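-- pv_equiv track=rewrite | github.com/pablo-aledo/dotfiles | pkg/Ubuntu_22_04/mscz2vec/drummer.py | transform_phase_shift
-- ===== SOURCE A (Python) =====
-- def transform_phase_shift(grids: dict, rate_steps: int,
--                            total_bars: int) -> dict:
--     """
--     Desplaza el patrón de percusión rate_steps pasos por compás.
--     Crea el efecto de phase shifting de Steve Reich.
--     """
--     result = {}
--     steps_per_bar = 16
--
--     for instr, arr in grids.items():
--         new_arr = list(arr)
--         n = len(arr)
--
--         for bar in range(total_bars):
--             shift = (bar * rate_steps) % steps_per_bar
--             bar_start = bar * steps_per_bar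
--             bar_end   = min(bar_start + steps_per_bar, n)
--             bar_slice = arr[bar_start:bar_end]
--
--             if len(bar_slice) == steps_per_bar and shift > 0:
--                 rotated = bar_slice[shift:] + bar_slice[:shift]
--                 new_arr[bar_start:bar_end] = rotated
--
--         result[instr] = new_arr
--
--     return result
-- ===== SOURCE B (Python) =====
-- def transform_phase_shift(grids: dict, rate_steps: int,
--                            total_bars: int) -> dict:
--     """Element-wise gather: each output position reads its source element
--     directly via a closed-form index map, with no slicing or rotation."""
--     result = {}
--     for instr, arr in grids.items():
--         n = len(arr)
--         result[instr] = [
--             arr[(i // 16) * 16 + (i + (i // 16) * rate_steps) % 16]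
--             if i // 16 < total_bars and (i // 16 + 1) * 16 <= n
--             else arr[i]
--             for i in range(n)
--         ]
--     return result
-- ===== Notes on version B (the rewrite author's own statement) =====
-- stated objective: alternative
-- what changed: Replaces A's per-bar loop with in-place slice-assignment of rotated 16-step slices by a single element-wise gather: one comprehension over all indices where each output position reads its source element directly through a closed-form index map (i//16)*16 + (i + (i//16)*rate_steps) % 16, with no slicing, rotation or mutation.
import Mathlib
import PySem

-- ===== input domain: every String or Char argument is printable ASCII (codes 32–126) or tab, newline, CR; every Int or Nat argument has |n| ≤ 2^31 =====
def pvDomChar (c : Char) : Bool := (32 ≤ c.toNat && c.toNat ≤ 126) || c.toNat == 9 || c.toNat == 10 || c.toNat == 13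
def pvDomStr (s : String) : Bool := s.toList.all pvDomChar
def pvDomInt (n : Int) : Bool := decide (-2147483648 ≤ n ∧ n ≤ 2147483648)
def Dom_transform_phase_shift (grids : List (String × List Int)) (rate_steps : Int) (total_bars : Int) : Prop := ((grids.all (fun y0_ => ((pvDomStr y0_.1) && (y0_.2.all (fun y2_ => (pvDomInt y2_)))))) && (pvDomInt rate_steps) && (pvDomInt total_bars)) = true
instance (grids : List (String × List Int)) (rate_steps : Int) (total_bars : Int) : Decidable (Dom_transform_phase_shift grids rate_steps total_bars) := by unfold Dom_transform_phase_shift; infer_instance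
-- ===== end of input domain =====

-- B replaces A's per-bar rotate-and-splice loop by a single element-wise gather with a
-- closed-form source-index map (same cost; a different algorithm, no slicing or mutation).

-- ===== PORT A =====
-- one iteration of A's inner `for bar in range(total_bars)` loop; the slice
-- assignment new_arr[bar_start:bar_end] = rotated is take/++/drop, exact here since
-- the guard guarantees 0 ≤ bar_start and bar_end = bar_start + 16 ≤ len(new_arr)
def tpsBodyA (arr : List Int) (rate_steps : Int) (n : Int) (new_arr : List Int) (bar : Int) : List Int :=
  let shift := PySem.Int.mod (bar * rate_steps) 16
  let bar_start := bar * 16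
  let bar_end := min (bar_start + 16) n
  let bar_slice := PySem.List.slice arr (some bar_start) (some bar_end)
  if bar_slice.length = 16 ∧ shift > 0 then
    new_arr.take bar_start.toNat ++
      (PySem.List.slice bar_slice (some shift) none ++ PySem.List.slice bar_slice none (some shift)) ++
      new_arr.drop bar_end.toNat
  else new_arr

def transform_phase_shift (grids : List (String × List Int)) (rate_steps : Int) (total_bars : Int) : List (String × List Int) :=
  (grids.foldl (fun (result : PySem.Dict String (List Int)) p =>
    let arr := p.2
    let n : Int := arr.length
    let new_arr := (PySem.List.pyRange 0 total_bars 1).foldl (tpsBodyA arr rate_steps n) arr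
    result.insert p.1 new_arr) PySem.Dict.empty).items

-- ===== PORT B =====
-- one element of B's comprehension; Python's arr[idx] is pyGetD: the index is always
-- in range here (in the gather branch 0 ≤ idx < (b+1)*16 ≤ n by the guard, else idx = i < n),
-- so the default is never read and pyGetD is exact
def tpsElemB (arr : List Int) (rate_steps : Int) (total_bars : Int) (n : Int) (i : Int) : Int :=
  let b := PySem.Int.floordiv i 16
  if b < total_bars ∧ (b + 1) * 16 ≤ n then
    PySem.List.pyGetD arr (b * 16 + PySem.Int.mod (i + b * rate_steps) 16) 0
  else PySem.List.pyGetD arr i 0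

def transform_phase_shift_alt (grids : List (String × List Int)) (rate_steps : Int) (total_bars : Int) : List (String × List Int) :=
  (grids.foldl (fun (result : PySem.Dict String (List Int)) p =>
    let arr := p.2
    let n : Int := arr.length
    result.insert p.1 ((PySem.List.pyRange 0 n 1).map (tpsElemB arr rate_steps total_bars n))) PySem.Dict.empty).items

-- ===== PRECONDITION & SPEC =====
def Spec_transform_phase_shift (grids : List (String × List Int)) (rate_steps : Int) (total_bars : Int) (out : List (String × List Int)) : Prop := out = transform_phase_shift_alt grids rate_steps total_bars
instance (grids : List (String × List Int)) (rate_steps : Int) (total_bars : Int) (out : List (String × List Int)) : Decidable (Spec_transform_phase_shift grids rate_steps total_bars out) := by unfold Spec_transform_phase_shift; infer_instance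

-- ===== CLAIM (what is proved, stated in full; the proofs are below) =====
def Claim_equal_transform_phase_shift : Prop := ∀ (grids : List (String × List Int)) (rate_steps : Int) (total_bars : Int), Dom_transform_phase_shift grids rate_steps total_bars → Spec_transform_phase_shift grids rate_steps total_bars (transform_phase_shift grids rate_steps total_bars)

-- ===== LEMMAS AND PROOFS =====

-- the (nonnegative) rotation shift of bar b, as a Nat
def shiftN (rs : Int) (b : Nat) : Nat := (PySem.Int.mod ((b : Int) * rs) 16).toNat

-- the rotated chunk of bar b, the canonical middle form both ports are reduced to
def tpsChunk (arr : List Int) (rs : Int) (b : Nat) : List Int :=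
  let chunk := (arr.drop (16 * b)).take 16
  chunk.drop (shiftN rs b) ++ chunk.take (shiftN rs b)

-- the canonical result: the first m rotated chunks followed by the untouched tail
def chunksOut (arr : List Int) (rs : Int) (m : Nat) : List Int :=
  (List.range m).foldl (fun out b => out ++ tpsChunk arr rs b) []

theorem shiftN_lt (rs : Int) (b : Nat) : shiftN rs b < 16 := by
  unfold shiftN
  have h1 := PySem.Int.mod_nonneg ((b : Int) * rs) (b := 16) (by norm_num)
  have h2 := PySem.Int.mod_lt ((b : Int) * rs) (b := 16) (by norm_num)
  omega

theorem chunksOut_succ (arr : List Int) (rs : Int) (m : Nat) :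
    chunksOut arr rs (m + 1) = chunksOut arr rs m ++ tpsChunk arr rs m := by
  unfold chunksOut
  rw [List.range_succ, List.foldl_append]
  rfl

theorem tpsChunk_length (arr : List Int) (rs : Int) (b : Nat) (hb : 16 * (b + 1) ≤ arr.length) :
    (tpsChunk arr rs b).length = 16 := by
  simp only [tpsChunk, List.length_append, List.length_drop, List.length_take]
  omega

theorem chunksOut_length (arr : List Int) (rs : Int) (m : Nat) (hm : 16 * m ≤ arr.length) :
    (chunksOut arr rs m).length = 16 * m := by
  induction m with
  | zero => rfl
  | succ k ih =>
      rw [chunksOut_succ, List.length_append, ih (by omega),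
          tpsChunk_length arr rs k (by omega)]
      ring

-- element characterisation of a rotated chunk: position j reads source (j + shift) % 16
theorem tpsChunk_getD (arr : List Int) (rs : Int) (b : Nat) (hb : 16 * (b + 1) ≤ arr.length)
    (j : Nat) (hj : j < 16) :
    (tpsChunk arr rs b).getD j 0 = arr.getD (16 * b + (j + shiftN rs b) % 16) 0 := by
  have hs := shiftN_lt rs b
  have hclen : ((arr.drop (16 * b)).take 16).length = 16 := by
    simp [List.length_take, List.length_drop]; omega
  have hrot : tpsChunk arr rs b = ((arr.drop (16 * b)).take 16).rotate (shiftN rs b) := by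
    rw [List.rotate_eq_drop_append_take (by rw [hclen]; exact hs.le)]
    rfl
  rw [hrot]
  have hjlt : j < (((arr.drop (16 * b)).take 16).rotate (shiftN rs b)).length := by
    rw [List.length_rotate, hclen]; exact hj
  rw [List.getD_eq_getElem _ _ hjlt, List.getElem_rotate]
  simp only [hclen]
  have hlt : (j + shiftN rs b) % 16 < 16 := Nat.mod_lt _ (by norm_num)
  have h2 : 16 * b + (j + shiftN rs b) % 16 < arr.length := by omega
  rw [List.getElem_take, List.getElem_drop, List.getD_eq_getElem _ _ h2]

theorem chunksOut_getD (arr : List Int) (rs : Int) (m : Nat) (hm : 16 * m ≤ arr.length)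
    (i : Nat) (hi : i < 16 * m) :
    (chunksOut arr rs m).getD i 0 =
      arr.getD (16 * (i / 16) + (i % 16 + shiftN rs (i / 16)) % 16) 0 := by
  induction m with
  | zero => omega
  | succ k ih =>
      rw [chunksOut_succ]
      have hck := chunksOut_length arr rs k (by omega)
      by_cases hik : i < 16 * k
      · rw [List.getD_append _ _ _ _ (by omega)]
        exact ih (by omega) hik
      · have hb : i / 16 = k := by omega
        have hj : i % 16 = i - 16 * k := by omega
        rw [List.getD_append_right _ _ _ _ (by omega), hck,
            tpsChunk_getD arr rs k (by omega) (i - 16 * k) (by omega), hb, hj]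

-- the Python source-index arithmetic: (i + (i//16)*rs) % 16 is (i%16 + shift(i//16)) % 16
theorem mod_gather (rs : Int) (iN : Nat) :
    PySem.Int.mod ((iN : Int) + ((iN / 16 : Nat) : Int) * rs) 16 =
      (((iN % 16 + shiftN rs (iN / 16)) % 16 : Nat) : Int) := by
  have hpos : (0 : Int) < 16 := by norm_num
  set B := iN / 16 with hB
  set J := iN % 16 with hJ
  have hsnn : (0 : Int) ≤ PySem.Int.mod ((B : Int) * rs) 16 := PySem.Int.mod_nonneg _ hpos
  have hscast : ((shiftN rs B : Nat) : Int) = ((B : Int) * rs) % 16 := by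
    rw [shiftN, Int.toNat_of_nonneg hsnn, PySem.Int.mod_eq_emod_of_pos hpos]
  have hiN : (iN : Int) = 16 * (B : Int) + (J : Int) := by omega
  rw [PySem.Int.mod_eq_emod_of_pos hpos, hiN]
  push_cast [hscast]
  omega

-- B's comprehension equals the canonical form, with m = the clamped complete-bar count
theorem tps_b_eq (arr : List Int) (rs tb : Int) :
    (PySem.List.pyRange 0 (arr.length : Int) 1).map (tpsElemB arr rs tb arr.length) =
      chunksOut arr rs (min tb.toNat (arr.length / 16)) ++
        arr.drop (16 * min tb.toNat (arr.length / 16)) := by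
  set n := arr.length with hn
  set m := min tb.toNat (n / 16) with hm
  have hmn : 16 * m ≤ n := by
    have := Nat.div_mul_le_self n 16
    omega
  have hco := chunksOut_length arr rs m hmn
  apply List.ext_getElem
  · simp [PySem.List.length_pyRange_one, hco]
    omega
  · intro i h1 h2
    have hin : i < n := by
      have hl := PySem.List.length_pyRange_one (a := 0) (b := (n : Int))
      rw [List.length_map, hl] at h1
      omega
    rw [List.getElem_map, PySem.List.getElem_pyRange_one,
        show (0 : Int) + (i : Int) = (i : Int) by ring]
    have hb : PySem.Int.floordiv (i : Int) 16 = ((i / 16 : Nat) : Int) := by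
      exact_mod_cast PySem.Int.floordiv_natCast i 16
    have hguard : (PySem.Int.floordiv (i : Int) 16 < tb ∧
        (PySem.Int.floordiv (i : Int) 16 + 1) * 16 ≤ ((n : Nat) : Int)) ↔ i < 16 * m := by
      rw [hb]
      constructor
      · rintro ⟨h3, h4⟩
        have h6 : ((i / 16 + 1) * 16 : Nat) ≤ n := by exact_mod_cast h4
        have h7 : i / 16 < n / 16 := by omega
        omega
      · intro h3
        have h5 : i / 16 < m := by omega
        have h6 : ((i / 16 + 1) * 16 : Nat) ≤ n := by omega
        exact ⟨by omega, by exact_mod_cast h6⟩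
    simp only [tpsElemB]
    by_cases hcase : i < 16 * m
    · rw [if_pos (hguard.mpr hcase), hb, mod_gather rs i,
          show ((i / 16 : Nat) : Int) * 16 + (((i % 16 + shiftN rs (i / 16)) % 16 : Nat) : Int) =
            ((16 * (i / 16) + (i % 16 + shiftN rs (i / 16)) % 16 : Nat) : Int) by push_cast; ring,
          PySem.List.pyGetD_natCast,
          ← List.getD_eq_getElem (chunksOut arr rs m ++ arr.drop (16 * m)) 0 h2,
          List.getD_append _ _ _ _ (by omega), chunksOut_getD arr rs m hmn i hcase]
    · rw [if_neg (fun hh => hcase (hguard.mp hh)), PySem.List.pyGetD_natCast,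
          ← List.getD_eq_getElem (chunksOut arr rs m ++ arr.drop (16 * m)) 0 h2,
          List.getD_append_right _ _ _ _ (by omega), hco]
      have hdrop : (arr.drop (16 * m)).getD (i - 16 * m) 0 = arr.getD i 0 := by
        rw [List.getD_eq_getElem _ _ (by rw [List.length_drop]; omega), List.getElem_drop]
        simp only [show 16 * m + (i - 16 * m) = i by omega]
        rw [List.getD_eq_getElem _ _ (by omega : i < arr.length)]
      rw [hdrop, List.getD_eq_getElem _ _ (by omega : i < arr.length)]

-- A's fold over k bars equals the canonical form for min k (len/16) bars
theorem tps_key (arr : List Int) (rs : Int) (k : Nat) :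
    (PySem.List.pyRange 0 (k : Int) 1).foldl (tpsBodyA arr rs arr.length) arr =
      chunksOut arr rs (min k (arr.length / 16)) ++ arr.drop (16 * min k (arr.length / 16)) := by
  induction k with
  | zero => simp [chunksOut]
  | succ k ih =>
      rw [show ((k + 1 : Nat) : Int) = (k : Int) + 1 by push_cast; ring,
          PySem.List.pyRange_one_succ_right (by positivity), List.foldl_append,
          List.foldl_cons, List.foldl_nil, ih]
      set N := arr.length / 16 with hN
      have hshift : (0 : Int) ≤ PySem.Int.mod ((k : Int) * rs) 16 ∧
          PySem.Int.mod ((k : Int) * rs) 16 < 16 :=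
        ⟨PySem.Int.mod_nonneg _ (by norm_num), PySem.Int.mod_lt _ (by norm_num)⟩
      by_cases hk : k < N
      · -- full bar: 16*(k+1) ≤ len
        have hfull : 16 * (k + 1) ≤ arr.length := by
          have := Nat.div_mul_le_self arr.length 16
          omega
        have hmin : min k N = k := by omega
        have hmin' : min (k + 1) N = k + 1 := by omega
        rw [hmin, hmin']
        simp only [tpsBodyA]
        rw [show (k : Int) * 16 = ((16 * k : Nat) : Int) by push_cast; ring,
            show min (((16 * k : Nat) : Int) + 16) ((arr.length : Int)) =
              ((16 * k + 16 : Nat) : Int) by push_cast; omega,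
            PySem.List.slice_natCast, show 16 * k + 16 - 16 * k = 16 by omega]
        have hlen : ((arr.drop (16 * k)).take 16).length = 16 := by
          simp [List.length_take, List.length_drop]; omega
        have hco : (chunksOut arr rs k).length = 16 * k :=
          chunksOut_length arr rs k (by omega)
        by_cases hpos : 0 < PySem.Int.mod ((k : Int) * rs) 16
        · rw [if_pos ⟨hlen, hpos⟩, Int.toNat_natCast, Int.toNat_natCast,
              PySem.List.slice_from _ hshift.1, PySem.List.slice_to _ hshift.1,
              List.take_left' hco, chunksOut_succ]
          have h1 : List.drop (16 * k + 16) (chunksOut arr rs k) = [] :=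
            List.drop_eq_nil_of_le (by omega)
          rw [List.drop_append, List.drop_drop, hco, h1]
          have h2 : 16 * k + (16 * k + 16 - 16 * k) = 16 * (k + 1) := by omega
          simp only [List.nil_append, List.append_assoc, h2]
          simp only [tpsChunk, shiftN, List.append_assoc]
        · rw [if_neg (fun h => hpos h.2), chunksOut_succ]
          have hc : tpsChunk arr rs k = (arr.drop (16 * k)).take 16 := by
            unfold tpsChunk
            rw [show shiftN rs k = 0 by unfold shiftN; omega]
            simp
          rw [hc, List.append_assoc, show 16 * (k + 1) = 16 * k + 16 by ring,
              ← List.drop_drop, List.take_append_drop]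
      · -- partial/absent bar: guard false, both sides unchanged
        have hmin : min k N = N := by omega
        have hmin' : min (k + 1) N = N := by omega
        have hsmall : arr.length < 16 * k + 16 := by omega
        rw [hmin, hmin']
        simp only [tpsBodyA]
        rw [if_neg]
        intro h
        obtain ⟨h1, -⟩ := h
        rw [show (k : Int) * 16 = ((16 * k : Nat) : Int) by push_cast; ring,
            show min (((16 * k : Nat) : Int) + 16) ((arr.length : Int)) =
              ((min (16 * k + 16) arr.length : Nat) : Int) by push_cast; omega,
            PySem.List.slice_natCast] at h1
        simp [List.length_take, List.length_drop] at h1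
        omega

-- per-array equality of the two ports, every total_bars
theorem tps_arr_eq (arr : List Int) (rs tb : Int) :
    (PySem.List.pyRange 0 tb 1).foldl (tpsBodyA arr rs arr.length) arr =
      (PySem.List.pyRange 0 (arr.length : Int) 1).map (tpsElemB arr rs tb arr.length) := by
  rw [tps_b_eq]
  by_cases htb : tb ≤ 0
  · have h0 : tb.toNat = 0 := by omega
    rw [h0, PySem.List.pyRange_one_eq_nil htb]
    simp [chunksOut]
  · obtain ⟨t, rfl⟩ : ∃ t : Nat, tb = (t : Int) := ⟨tb.toNat, by omega⟩
    rw [Int.toNat_natCast]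
    exact tps_key arr rs t

-- ===== VERDICT (by name: the statement is the Claim_ definition above) =====
theorem transform_phase_shift_spec : Claim_equal_transform_phase_shift := by
  intro grids rate_steps total_bars _
  unfold Spec_transform_phase_shift transform_phase_shift transform_phase_shift_alt
  congr 2
  funext result p
  simp only [tps_arr_eq]
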